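-- pv_equiv track=rewrite | github.com/AINative-Studio/openclaw-backend | backend/p2p/libp2p_identity.py | validate_peer_id_format
-- ===== SOURCE A (Python) =====
-- def validate_peer_id_format(peer_id: str) -> bool:
--     """
--     Validate that a peer_id follows libp2p format.
--     Expected format: "12D3KooW" prefix followed by base58 characters.
--     """
--     if not peer_id:
--         return False
--
--     # Check prefix
--     if not peer_id.startswith("12D3KooW"):
--         return False
--
--     # Check length (should be reasonable)
--     if len(peer_id) < 20:
--         return False
--
--     # Check base58 characters in suffix
--     base58_chars = set("123456789ABCDEFGHJKLMNPQRSTUVWXYZabcdefghijkmnopqrstuvwxyz")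
--     suffix = peer_id[8:]  # Skip prefix
--
--     return all(c in base58_chars for c in suffix)
-- ===== SOURCE B (Python) =====
-- _PREFIX = "12D3KooW"
-- _B58 = "123456789ABCDEFGHJKLMNPQRSTUVWXYZabcdefghijkmnopqrstuvwxyz"
-- _REJECT = -1
--
--
-- def _step(state, c):
--     # DFA transition: states 0..7 match the prefix position by position,
--     # state 8 accepts base58 characters, -1 is the absorbing reject state.
--     if state == _REJECT:
--         return _REJECT
--     if state < 8:
--         return state + 1 if c == _PREFIX[state] else _REJECT
--     return 8 if c in _B58 else _REJECT
--
--
-- def validate_peer_id_format(peer_id: str) -> bool: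
--     state = 0
--     for c in peer_id:
--         state = _step(state, c)
--     return state == 8 and len(peer_id) >= 20
-- ===== Notes on version B (the rewrite author's own statement) =====
-- stated objective: alternative
-- what changed: Replaced A's early-return chain (startswith, length test, slice, all-in-set) by a deterministic finite automaton: one fold over the characters with an integer state (prefix positions 0..7, accepting base58 state 8, absorbing reject -1), accepting iff the final state is 8 and the length is at least 20.
import Mathlib
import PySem

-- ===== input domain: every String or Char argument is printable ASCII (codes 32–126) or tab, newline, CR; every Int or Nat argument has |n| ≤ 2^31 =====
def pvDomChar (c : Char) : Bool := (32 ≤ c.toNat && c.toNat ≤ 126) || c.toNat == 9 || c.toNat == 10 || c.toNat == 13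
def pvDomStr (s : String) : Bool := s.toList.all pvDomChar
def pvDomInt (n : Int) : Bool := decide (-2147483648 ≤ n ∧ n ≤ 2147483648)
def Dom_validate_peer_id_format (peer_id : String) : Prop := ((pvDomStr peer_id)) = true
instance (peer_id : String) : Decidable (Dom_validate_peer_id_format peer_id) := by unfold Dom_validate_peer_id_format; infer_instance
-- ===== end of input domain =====

-- B replaces A's early-return chain (startswith + length test + slice + all-in-set) by a
-- deterministic finite automaton folded once over the characters; same cost, alternative structure.

-- ===== PORT A =====
def pyBase58Chars : PySem.Set Char :=
  PySem.Set.ofList "123456789ABCDEFGHJKLMNPQRSTUVWXYZabcdefghijkmnopqrstuvwxyz".toList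

def validate_peer_id_format (peer_id : String) : Bool :=
  if PySem.Str.len peer_id == 0 then false
  else if !(PySem.Str.startswith peer_id "12D3KooW") then false
  else if PySem.Str.len peer_id < 20 then false
  else (PySem.List.slice peer_id.toList (some 8) none).all (fun c => pyBase58Chars.contains c)

-- ===== PORT B =====
def pvPrefix : List Char := "12D3KooW".toList

def pvB58 : List Char := "123456789ABCDEFGHJKLMNPQRSTUVWXYZabcdefghijkmnopqrstuvwxyz".toList

-- DFA transition; `c == _PREFIX[state]` is ported with pyGet? (state is 0..7 there, so in range);
-- `c in _B58` (a one-character substring test in Python) is exactly character membership.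
def pvStep (state : Int) (c : Char) : Int :=
  if state == -1 then -1
  else if state < 8 then
    if some c == PySem.List.pyGet? pvPrefix state then state + 1 else -1
  else if pvB58.contains c then 8 else -1

def validate_peer_id_format_alt (peer_id : String) : Bool :=
  (peer_id.toList.foldl pvStep 0 == 8) && !(PySem.Str.len peer_id < 20)

-- ===== PRECONDITION & SPEC =====
def Spec_validate_peer_id_format (peer_id : String) (out : Bool) : Prop := out = validate_peer_id_format_alt peer_id
instance (peer_id : String) (out : Bool) : Decidable (Spec_validate_peer_id_format peer_id out) := by unfold Spec_validate_peer_id_format; infer_instance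

-- ===== CLAIM (what is proved, stated in full; the proofs are below) =====
def Claim_equal_validate_peer_id_format : Prop := ∀ (peer_id : String), Dom_validate_peer_id_format peer_id → Spec_validate_peer_id_format peer_id (validate_peer_id_format peer_id)

-- ===== LEMMAS AND PROOFS =====

-- the DFA transition at each concrete prefix state
theorem pvStep0 (c : Char) : pvStep 0 c = if c = '1' then 1 else -1 := by
  by_cases h : c = '1' <;> simp [pvStep, h, (by decide : PySem.List.pyGet? pvPrefix 0 = some '1')]
theorem pvStep1 (c : Char) : pvStep 1 c = if c = '2' then 2 else -1 := by
  by_cases h : c = '2' <;> simp [pvStep, h, (by decide : PySem.List.pyGet? pvPrefix 1 = some '2')]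
theorem pvStep2 (c : Char) : pvStep 2 c = if c = 'D' then 3 else -1 := by
  by_cases h : c = 'D' <;> simp [pvStep, h, (by decide : PySem.List.pyGet? pvPrefix 2 = some 'D')]
theorem pvStep3 (c : Char) : pvStep 3 c = if c = '3' then 4 else -1 := by
  by_cases h : c = '3' <;> simp [pvStep, h, (by decide : PySem.List.pyGet? pvPrefix 3 = some '3')]
theorem pvStep4 (c : Char) : pvStep 4 c = if c = 'K' then 5 else -1 := by
  by_cases h : c = 'K' <;> simp [pvStep, h, (by decide : PySem.List.pyGet? pvPrefix 4 = some 'K')]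
theorem pvStep5 (c : Char) : pvStep 5 c = if c = 'o' then 6 else -1 := by
  by_cases h : c = 'o' <;> simp [pvStep, h, (by decide : PySem.List.pyGet? pvPrefix 5 = some 'o')]
theorem pvStep6 (c : Char) : pvStep 6 c = if c = 'o' then 7 else -1 := by
  by_cases h : c = 'o' <;> simp [pvStep, h, (by decide : PySem.List.pyGet? pvPrefix 6 = some 'o')]
theorem pvStep7 (c : Char) : pvStep 7 c = if c = 'W' then 8 else -1 := by
  by_cases h : c = 'W' <;> simp [pvStep, h, (by decide : PySem.List.pyGet? pvPrefix 7 = some 'W')]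
theorem pvStep8 (c : Char) : pvStep 8 c = if pvB58.contains c then 8 else -1 := by
  by_cases h : pvB58.contains c <;> simp [pvStep, h]

-- the reject state is absorbing
theorem pvFold_reject (l : List Char) : l.foldl pvStep (-1) = -1 := by
  induction l with
  | nil => rfl
  | cons c rest ih => simpa [pvStep] using ih

-- from the accepting state the fold is the base58 check on the remaining characters
theorem pvFold_from8 (l : List Char) :
    l.foldl pvStep 8 = if l.all (fun c => pvB58.contains c) then 8 else -1 := by
  induction l with
  | nil => rfl
  | cons c rest ih =>
    rw [List.foldl_cons, pvStep8]
    by_cases hc : pvB58.contains c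
    · rw [if_pos hc, ih, List.all_cons, hc, Bool.true_and]
    · rw [if_neg hc, pvFold_reject, List.all_cons,
        Bool.eq_false_iff.mpr hc, Bool.false_and, if_neg (by simp)]

-- on the domain (code points < 127), A's set membership coincides with B's list membership
set_option maxRecDepth 8192 in
theorem b58_class_eq_aux : ∀ n, n < 127 →
    pyBase58Chars.contains (Char.ofNat n) = pvB58.contains (Char.ofNat n) := by decide

theorem b58_class_eq (c : Char) (h : pvDomChar c = true) :
    pyBase58Chars.contains c = pvB58.contains c := by
  have hlt : c.toNat < 127 := by simp [pvDomChar] at h; omega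
  have := b58_class_eq_aux c.toNat hlt
  rwa [Char.ofNat_toNat] at this

-- `all` only looks at members
theorem pvAll_mem_congr {f g : Char → Bool} : ∀ l : List Char,
    (∀ x ∈ l, f x = g x) → l.all f = l.all g := by
  intro l h
  induction l with
  | nil => rfl
  | cons a t ih =>
    simp only [List.all_cons, h a (List.mem_cons_self ..),
      ih fun x hx => h x (List.mem_cons_of_mem _ hx)]

-- A's body (after the empty/length tests) against the DFA fold, on an explicit 8-char head
theorem pvMainCore (c0 c1 c2 c3 c4 c5 c6 c7 : Char) (rest : List Char) :
    (if (!PySem.Chars.startswith (c0::c1::c2::c3::c4::c5::c6::c7::rest) "12D3KooW".toList) = true then false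
     else rest.all (fun c => pvB58.contains c))
    = (List.foldl pvStep 0 (c0::c1::c2::c3::c4::c5::c6::c7::rest) == 8) := by
  rw [List.foldl_cons, pvStep0]
  by_cases h0 : c0 = '1'
  case neg => rw [if_neg h0, pvFold_reject]
              simp [PySem.Chars.startswith, List.isPrefixOf, Ne.symm h0]
  subst h0; rw [if_pos rfl, List.foldl_cons, pvStep1]
  by_cases h1 : c1 = '2'
  case neg => rw [if_neg h1, pvFold_reject]
              simp [PySem.Chars.startswith, List.isPrefixOf, Ne.symm h1]
  subst h1; rw [if_pos rfl, List.foldl_cons, pvStep2]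
  by_cases h2 : c2 = 'D'
  case neg => rw [if_neg h2, pvFold_reject]
              simp [PySem.Chars.startswith, List.isPrefixOf, Ne.symm h2]
  subst h2; rw [if_pos rfl, List.foldl_cons, pvStep3]
  by_cases h3 : c3 = '3'
  case neg => rw [if_neg h3, pvFold_reject]
              simp [PySem.Chars.startswith, List.isPrefixOf, Ne.symm h3]
  subst h3; rw [if_pos rfl, List.foldl_cons, pvStep4]
  by_cases h4 : c4 = 'K'
  case neg => rw [if_neg h4, pvFold_reject]
              simp [PySem.Chars.startswith, List.isPrefixOf, Ne.symm h4]
  subst h4; rw [if_pos rfl, List.foldl_cons, pvStep5]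
  by_cases h5 : c5 = 'o'
  case neg => rw [if_neg h5, pvFold_reject]
              simp [PySem.Chars.startswith, List.isPrefixOf, Ne.symm h5]
  subst h5; rw [if_pos rfl, List.foldl_cons, pvStep6]
  by_cases h6 : c6 = 'o'
  case neg => rw [if_neg h6, pvFold_reject]
              simp [PySem.Chars.startswith, List.isPrefixOf, Ne.symm h6]
  subst h6; rw [if_pos rfl, List.foldl_cons, pvStep7]
  by_cases h7 : c7 = 'W'
  case neg => rw [if_neg h7, pvFold_reject]
              simp [PySem.Chars.startswith, List.isPrefixOf, Ne.symm h7]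
  subst h7; rw [if_pos rfl, pvFold_from8]
  simp only [PySem.Chars.startswith, List.isPrefixOf]
  norm_num
  split <;> simp_all

-- the two programs on the character list, once the length test has passed
theorem pvMain (l : List Char) (hdom : l.all pvDomChar = true) (hlen : 20 ≤ l.length) :
    (if (!PySem.Chars.startswith l "12D3KooW".toList) = true then false
     else (PySem.List.slice l (some 8) none).all (fun c => pyBase58Chars.contains c))
    = (l.foldl pvStep 0 == 8) := by
  rcases l with _|⟨c0,_|⟨c1,_|⟨c2,_|⟨c3,_|⟨c4,_|⟨c5,_|⟨c6,_|⟨c7,rest⟩⟩⟩⟩⟩⟩⟩⟩ <;>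
    try (simp at hlen)
  have hall : rest.all (fun c => pyBase58Chars.contains c)
      = rest.all (fun c => pvB58.contains c) := by
    refine pvAll_mem_congr rest fun x hx => b58_class_eq x ?_
    simp only [List.all_cons, List.all_eq_true, Bool.and_eq_true] at hdom
    exact hdom.2.2.2.2.2.2.2.2 x hx
  have hsl : PySem.List.slice (c0::c1::c2::c3::c4::c5::c6::c7::rest) (some 8) none = rest := by
    simp [pysem]
  rw [hsl, hall, pvMainCore]

-- ===== VERDICT (by name: the statement is the Claim_ definition above) =====
theorem validate_peer_id_format_spec : Claim_equal_validate_peer_id_format := by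
  intro s hdom
  unfold Spec_validate_peer_id_format validate_peer_id_format validate_peer_id_format_alt
  have hdom' : s.toList.all pvDomChar = true := hdom
  by_cases hlen : PySem.Str.len s < 20
  · -- both sides are false
    simp only [hlen, decide_true, Bool.not_true, Bool.and_false]
    split_ifs <;> rfl
  · have hlen' : 20 ≤ s.toList.length := by
      simp [PySem.Str.len_eq] at hlen; rw [String.length_toList]; omega
    have hne : ¬ (PySem.Str.len s == 0) = true := by
      simp [PySem.Str.len_eq]
      intro h; subst h; simp at hlen'
    simp only [hne, if_false, hlen, decide_false, Bool.not_false, Bool.and_true,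
      if_neg (show ¬ PySem.Str.len s < 20 from hlen)]
    have := pvMain s.toList hdom' hlen'
    rw [← PySem.Str.startswith_eq] at this
    exact this
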